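-- pv_equiv track=rewrite | github.com/spins-ai/turf-data-pipeline | monitor_pipeline.py | detect_running_step
-- ===== SOURCE A (Python) =====
-- from typing import Dict, List, Optional, Tuple
--
-- def detect_running_step(log_lines: List[str]) -> Optional[str]:
--     """Try to detect which step is currently running from recent log lines."""
--     for line in reversed(log_lines):
--         if "] Demarrage -> " in line:
--             # Extract step name from "[step_name] Demarrage -> script.py"
--             try:
--                 bracket_start = line.index("[") + 1
--                 bracket_end = line.index("]", bracket_start)
--                 return line[bracket_start:bracket_end]
--             except ValueError:
--                 pass
--         if "Vague " in line and "RUN" in line: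
--             return line.split("RUN")[-1].strip().rstrip(")")
--     return None
-- ===== SOURCE B (Python) =====
-- from typing import List, Optional
--
--
-- def _strip_step_suffix(text: str) -> str:
--     t = text.strip()
--     while t.endswith(")"):
--         t = t[:-1]
--     return t
--
--
-- def _step_of(line: str) -> Optional[str]:
--     """Step name encoded in one line, or None (find-based guards, no exceptions)."""
--     if line.find("] Demarrage -> ") >= 0:
--         b = line.find("[")
--         if b >= 0:
--             e = line.find("]", b + 1)
--             if e >= 0:
--                 return line[b + 1:e]
--     if line.find("Vague ") >= 0 and line.find("RUN") >= 0:
--         return _strip_step_suffix(line.split("RUN")[-1])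
--     return None
--
--
-- def detect_running_step(log_lines: List[str]) -> Optional[str]:
--     """Collect every line's parse in one forward pass, return the last hit."""
--     hits = [v for v in map(_step_of, log_lines) if v is not None]
--     return hits[-1] if hits else None
-- ===== Notes on version B (the rewrite author's own statement) =====
-- stated objective: alternative
-- what changed: B parses each line with find-based guards and nested ifs (no try/except), strips trailing ')' with a while-endswith loop, and returns the last hit of a single forward comprehension, instead of A's reversed iteration with membership tests, exception handling and early return.
import Mathlib
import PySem

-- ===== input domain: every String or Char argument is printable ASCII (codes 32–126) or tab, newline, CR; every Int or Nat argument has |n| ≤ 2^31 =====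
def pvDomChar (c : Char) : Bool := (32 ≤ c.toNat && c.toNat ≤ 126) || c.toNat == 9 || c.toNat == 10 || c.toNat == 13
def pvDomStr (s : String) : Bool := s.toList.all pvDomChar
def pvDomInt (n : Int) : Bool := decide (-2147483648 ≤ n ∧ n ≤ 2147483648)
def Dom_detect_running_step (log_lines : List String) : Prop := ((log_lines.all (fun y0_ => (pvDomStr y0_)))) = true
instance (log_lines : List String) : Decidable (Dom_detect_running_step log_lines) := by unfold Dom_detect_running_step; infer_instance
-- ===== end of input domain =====

-- B re-decomposes A: find-based guards (no try/except), a while-loop for the trailing-')'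
-- strip, and a forward comprehension returning the last successful parse, instead of A's
-- reversed iteration with membership tests and early return (objective: alternative).

-- ===== PORT A =====
-- exact hand port of Python's str.rstrip(")") (PySem has no rstrip-with-chars primitive):
-- drop trailing ')' characters
def pvRstripParen (s : String) : String :=
  String.ofList ((s.toList.reverse.dropWhile (fun c => c == ')')).reverse)

-- A iterates over reversed(log_lines), returning at the first line that parses;
-- the try/except ValueError around line.index is ported via find/findFrom = -1 checks.
def pvGoA : List String → Option String
  | [] => none
  | line :: rest =>
    let demarrage : Option String :=
      if PySem.Str.isIn "] Demarrage -> " line then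
        let i := PySem.Str.find line "["
        if i = -1 then none
        else
          let bracket_start := i + 1
          let j := PySem.Str.findFrom line "]" bracket_start
          if j = -1 then none
          else some (PySem.Str.slice line (some bracket_start) (some j))
      else none
    match demarrage with
    | some r => some r
    | none =>
      if PySem.Str.isIn "Vague " line && PySem.Str.isIn "RUN" line then
        some (pvRstripParen (PySem.Str.strip (((PySem.Str.split? line "RUN").getD []).getLastD "")))
      else pvGoA rest

def detect_running_step (log_lines : List String) : Option String :=
  pvGoA log_lines.reverse

-- ===== PORT B =====
-- _strip_step_suffix's while-loop: while t.endswith(")"): t = t[:-1]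
def pvTrimParens (cs : List Char) : List Char :=
  if h : PySem.Chars.endswith cs [')'] then pvTrimParens cs.dropLast else cs
termination_by cs.length
decreasing_by
  rcases (PySem.Chars.endswith_iff cs [')']).1 h with ⟨t, ht⟩
  have hne : cs ≠ [] := by cases cs <;> simp_all
  have hpos : 0 < cs.length := List.length_pos_iff.mpr hne
  simp only [List.length_dropLast]
  omega

def pvStripStepSuffix (text : String) : String :=
  String.ofList (pvTrimParens (PySem.Str.strip text).toList)

-- _step_of: find-based guards, nested ifs, no exception handling
def pvStepOf (line : String) : Option String :=
  if 0 ≤ PySem.Str.find line "] Demarrage -> " then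
    let b := PySem.Str.find line "["
    if 0 ≤ b then
      let e := PySem.Str.findFrom line "]" (b + 1)
      if 0 ≤ e then some (PySem.Str.slice line (some (b + 1)) (some e))
      else pvStepOfVague line
    else pvStepOfVague line
  else pvStepOfVague line
where
  pvStepOfVague (line : String) : Option String :=
    if 0 ≤ PySem.Str.find line "Vague " ∧ 0 ≤ PySem.Str.find line "RUN" then
      some (pvStripStepSuffix
        ((PySem.List.pyGet? ((PySem.Str.split? line "RUN").getD []) (-1)).getD ""))
    else none

def detect_running_step_alt (log_lines : List String) : Option String :=
  let hits := (log_lines.map pvStepOf).filterMap id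
  if hits = [] then none else PySem.List.pyGet? hits (-1)

-- ===== PRECONDITION & SPEC =====
def Spec_detect_running_step (log_lines : List String) (out : Option String) : Prop := out = detect_running_step_alt log_lines
instance (log_lines : List String) (out : Option String) : Decidable (Spec_detect_running_step log_lines out) := by unfold Spec_detect_running_step; infer_instance

-- ===== CLAIM (what is proved, stated in full; the proofs are below) =====
def Claim_equal_detect_running_step : Prop := ∀ (log_lines : List String), Dom_detect_running_step log_lines → Spec_detect_running_step log_lines (detect_running_step log_lines)

-- ===== LEMMAS AND PROOFS =====

-- B's while-endswith loop computes the same trailing-')' strip as A's reverse/dropWhile/reverse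
theorem pvTrimParens_eq_rev (r : List Char) :
    pvTrimParens r.reverse = (r.dropWhile (fun c => c == ')')).reverse := by
  induction r with
  | nil => simp [pvTrimParens, PySem.Chars.endswith]
  | cons c r ih =>
    rw [pvTrimParens]
    by_cases hc : c = ')'
    · subst hc
      have hend : PySem.Chars.endswith (')' :: r).reverse [')'] = true := by
        rw [PySem.Chars.endswith_iff]
        exact ⟨r.reverse, by simp⟩
      rw [dif_pos hend]
      have hdrop : (')' :: r).reverse.dropLast = r.reverse := by simp
      rw [hdrop, ih]
      simp [List.dropWhile]
    · have hend : ¬ PySem.Chars.endswith (c :: r).reverse [')'] = true := by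
        rw [PySem.Chars.endswith_iff]
        rintro ⟨t, ht⟩
        have hlast : (c :: r).reverse.getLast? = some ')' := by
          rw [← ht]; simp
        simp [List.getLast?_reverse] at hlast
        exact hc hlast
      rw [dif_neg hend]
      have hcb : (c == ')') = false := by simp [hc]
      simp [List.dropWhile, hcb]

theorem pvTrimParens_eq (cs : List Char) :
    pvTrimParens cs = (cs.reverse.dropWhile (fun c => c == ')')).reverse := by
  have h := pvTrimParens_eq_rev cs.reverse
  simpa using h

-- xs[-1] on a nonempty list is its last element
theorem pyGet_neg_one {α : Type} (l : List α) (h : l ≠ []) :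
    PySem.List.pyGet? l (-1) = l.getLast? := by
  have hlen : 0 < l.length := List.length_pos_iff.mpr h
  simp only [PySem.List.pyGet?, PySem.List.pyIdx?]
  rw [if_neg (by omega : ¬ (0 : Int) ≤ -1), if_pos (by omega : -(l.length : Int) ≤ -1)]
  have hcast : l.length - (-(-1 : Int)).toNat = l.length - 1 := by norm_num
  rw [hcast]
  simp [List.getLast?_eq_getElem?]

-- parts[-1] with a default is the last element with that default
theorem pyGet_neg_one_getD {α : Type} (l : List α) (d : α) :
    (PySem.List.pyGet? l (-1)).getD d = l.getLastD d := by
  cases l with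
  | nil => simp [PySem.List.pyGet?, PySem.List.pyIdx?]
  | cons x xs =>
    rw [pyGet_neg_one _ (by simp), List.getLastD_eq_getLast?]

-- membership test ↔ find-sign test (both sides of the guards)
theorem isIn_iff_find_nonneg (sub s : String) :
    PySem.Str.isIn sub s = true ↔ 0 ≤ PySem.Str.find s sub := by
  rw [PySem.Str.isIn_iff_infix, PySem.Str.find_nonneg_iff]

-- find s sub = -1 ↔ ¬ 0 ≤ find s sub   (find is ≥ -1)
theorem find_eq_neg_one_iff_not_nonneg (s sub : String) :
    PySem.Str.find s sub = -1 ↔ ¬ 0 ≤ PySem.Str.find s sub := by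
  have he : PySem.Str.find s sub = PySem.Chars.find s.toList sub.toList := by
    simp [PySem.Str.find_eq]
  have h : -1 ≤ PySem.Chars.find s.toList sub.toList := PySem.Chars.neg_one_le_find _ _
  rw [he]
  omega

-- findFrom at a nonnegative start returns -1 or a nonnegative index
theorem findFrom_neg_one_or_nonneg (s sub : List Char) (k : Int) (hk : 0 ≤ k) :
    PySem.Chars.findFrom s sub k none = -1 ∨ 0 ≤ PySem.Chars.findFrom s sub k none := by
  simp only [PySem.Chars.findFrom]
  rw [if_neg (by omega : ¬ k < 0)]
  by_cases h1 : (s.length : Int) < k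
  · rw [if_pos h1]; left; rfl
  · rw [if_neg h1]
    have hb := PySem.Chars.neg_one_le_find (List.drop k.toNat (List.take ((s.length : Int)).toNat s)) sub
    by_cases h2 : PySem.Chars.find (List.drop k.toNat (List.take ((s.length : Int)).toNat s)) sub = -1
    · rw [if_pos h2]; left; rfl
    · rw [if_neg h2]; right; omega

theorem findFrom_eq_neg_one_iff_not_nonneg (s sub : String) (k : Int) (hk : 0 ≤ k) :
    PySem.Str.findFrom s sub k none = -1 ↔ ¬ 0 ≤ PySem.Str.findFrom s sub k none := by
  have he : PySem.Str.findFrom s sub k none = PySem.Chars.findFrom s.toList sub.toList k none := by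
    simp [PySem.Str.findFrom_eq]
  have h := findFrom_neg_one_or_nonneg s.toList sub.toList k hk
  rw [he]
  omega

-- A's per-line inline parse equals B's _step_of helper
theorem pvGoA_cons (line : String) (rest : List String) :
    pvGoA (line :: rest) =
      match pvStepOf line with
      | some r => some r
      | none => pvGoA rest := by
  have htail :
      (if PySem.Str.isIn "Vague " line && PySem.Str.isIn "RUN" line then
        some (pvRstripParen (PySem.Str.strip (((PySem.Str.split? line "RUN").getD []).getLastD "")))
      else pvGoA rest) =
      (match pvStepOf.pvStepOfVague line with
      | some r => some r
      | none => pvGoA rest) := by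
    unfold pvStepOf.pvStepOfVague
    have hcond : ((PySem.Str.isIn "Vague " line && PySem.Str.isIn "RUN" line) = true) ↔
        (0 ≤ PySem.Str.find line "Vague " ∧ 0 ≤ PySem.Str.find line "RUN") := by
      rw [Bool.and_eq_true, isIn_iff_find_nonneg, isIn_iff_find_nonneg]
    by_cases hc : 0 ≤ PySem.Str.find line "Vague " ∧ 0 ≤ PySem.Str.find line "RUN"
    · rw [if_pos (hcond.2 hc), if_pos hc]
      unfold pvStripStepSuffix pvRstripParen
      rw [pvTrimParens_eq, pyGet_neg_one_getD]
    · rw [if_neg (fun h => hc (hcond.1 h)), if_neg hc]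
  simp only [pvGoA, pvStepOf]
  by_cases hd : 0 ≤ PySem.Str.find line "] Demarrage -> "
  · have hd' : PySem.Str.isIn "] Demarrage -> " line = true := (isIn_iff_find_nonneg _ _).2 hd
    rw [if_pos hd']
    by_cases hb : 0 ≤ PySem.Str.find line "["
    · have hb' : ¬ PySem.Str.find line "[" = -1 := by
        rw [find_eq_neg_one_iff_not_nonneg]; simpa using hb
      rw [if_pos hd, if_pos hb, if_neg hb']
      by_cases he : 0 ≤ PySem.Str.findFrom line "]" (PySem.Str.find line "[" + 1) none
      · have he' : ¬ PySem.Str.findFrom line "]" (PySem.Str.find line "[" + 1) none = -1 := by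
          rw [findFrom_eq_neg_one_iff_not_nonneg _ _ _ (by omega)]; simpa using he
        rw [if_neg he', if_pos he]
      · have he' : PySem.Str.findFrom line "]" (PySem.Str.find line "[" + 1) none = -1 :=
          (findFrom_eq_neg_one_iff_not_nonneg _ _ _ (by omega)).2 he
        rw [if_pos he', if_neg he]
        exact htail
    · have hb' : PySem.Str.find line "[" = -1 := (find_eq_neg_one_iff_not_nonneg _ _).2 hb
      rw [if_pos hd, if_neg hb, if_pos hb']
      exact htail
  · have hd' : ¬ PySem.Str.isIn "] Demarrage -> " line = true :=
      fun h => hd ((isIn_iff_find_nonneg _ _).1 h)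
    rw [if_neg hd', if_neg hd]
    exact htail

-- first hit over the reverse = last element of the forward hit list
theorem pvGoA_reverse_eq_getLast (ls : List String) :
    pvGoA ls.reverse = (ls.filterMap pvStepOf).getLast? := by
  induction ls using List.reverseRecOn with
  | nil => rfl
  | append_singleton ls x ih =>
    rw [List.reverse_append, List.filterMap_append]
    simp only [List.reverse_cons, List.reverse_nil, List.nil_append, List.singleton_append]
    rw [pvGoA_cons]
    cases hx : pvStepOf x with
    | some v => simp [List.filterMap, hx]
    | none => simp [List.filterMap, hx, ih]

-- B's tail expression 'hits[-1] if hits else None' is getLast?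
theorem if_pyGet_eq_getLast (hits : List String) :
    (if hits = [] then none else PySem.List.pyGet? hits (-1)) = hits.getLast? := by
  by_cases h : hits = []
  · subst h; simp
  · rw [if_neg h, pyGet_neg_one _ h]

-- ===== VERDICT (by name: the statement is the Claim_ definition above) =====
theorem detect_running_step_spec : Claim_equal_detect_running_step := by
  intro log_lines _
  unfold Spec_detect_running_step detect_running_step
  have halt : detect_running_step_alt log_lines = (log_lines.filterMap pvStepOf).getLast? := by
    unfold detect_running_step_alt
    simp only [List.filterMap_map]
    exact if_pyGet_eq_getLast _
  rw [halt]
  exact pvGoA_reverse_eq_getLast log_lines
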